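-- pv_equiv track=rewrite | github.com/scieloorg/PC-Programs | src/scielo/bin/xml/app_modules/generics/xml_utils.py | insert_preserve_spaces_mark
-- ===== SOURCE A (Python) =====
-- def insert_preserve_spaces_mark(text):
--     if text.startswith('<') and text.endswith('>'):
--         text = '<' + ' '.join(text[1:-1].split()) + '>'
--     elif text.strip() != '':
--         text = text.replace(' ', 'PRESERVESPACES').replace('\n', 'PRESERVESPACES')
--         text = ' '.join(text.split())
--         while 'PRESERVESPACESPRESERVESPACES' in text:
--             text = text.replace('PRESERVESPACESPRESERVESPACES', 'PRESERVESPACES')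
--     return text
-- ===== SOURCE B (Python) =====
-- def insert_preserve_spaces_mark(text):
--     if text.startswith('<') and text.endswith('>'):
--         return '<' + ' '.join(text[1:-1].split()) + '>'
--     if text.strip() == '':
--         return text
--     out = []
--     in_run = False
--     for ch in text:
--         if ch == ' ' or ch == '\n':
--             if not in_run:
--                 out.append('PRESERVESPACES')
--             in_run = True
--         else:
--             out.append(ch)
--             in_run = False
--     return ' '.join(''.join(out).split())
-- ===== Notes on version B (the rewrite author's own statement) =====
-- stated objective: alternative
-- what changed: A marks each space/newline via two chained replace passes and then collapses adjacent sentinels with a repeated global replace-until-fixpoint while-loop; B is a single-pass state machine emitting one sentinel per maximal run of spaces/newlines (no collapse loop), followed by the same split/join normalization.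
-- outside the precondition, e.g. on insert_preserve_spaces_mark('PRESERVESPACES '): A returns 'PRESERVESPACES', B returns 'PRESERVESPACESPRESERVESPACES'
import Mathlib
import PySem

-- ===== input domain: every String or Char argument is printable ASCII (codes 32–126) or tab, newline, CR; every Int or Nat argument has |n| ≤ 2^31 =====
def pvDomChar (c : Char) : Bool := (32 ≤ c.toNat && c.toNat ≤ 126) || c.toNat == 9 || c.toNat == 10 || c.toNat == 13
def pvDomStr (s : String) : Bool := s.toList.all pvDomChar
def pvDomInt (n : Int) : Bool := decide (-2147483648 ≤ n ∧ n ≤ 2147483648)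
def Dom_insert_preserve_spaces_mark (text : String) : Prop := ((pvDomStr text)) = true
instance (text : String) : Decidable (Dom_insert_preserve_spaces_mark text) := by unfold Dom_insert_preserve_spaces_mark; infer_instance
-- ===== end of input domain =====

-- B replaces A's replace/replace/collapse-while-loop marking by a one-pass run-marking state machine (objective: alternative algorithm, single pass instead of repeated global replaces); same '<...>' branch and final split-join normalization.

-- ===== PORT A =====
-- the sentinel 'PRESERVESPACES' as a char list
def pvM : List Char := ['P','R','E','S','E','R','V','E','S','P','A','C','E','S']
def pvMM : List Char := pvM ++ pvM

-- fuel-free reformulation of PySem.Chars.replace, used only by proofs and by the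
-- termination argument of the while-loop port below
def pvRepF (old new : List Char) : List Char → List Char
  | [] => []
  | c :: t =>
    if old.isPrefixOf (c :: t) then new ++ pvRepF old new ((c :: t).drop (max old.length 1))
    else c :: pvRepF old new t
termination_by l => l.length
decreasing_by
  · simp only [List.length_drop, List.length_cons]; omega
  · simp only [List.length_cons]; omega

theorem pvReplace_go_eq (old new : List Char) (h : old ≠ []) :
    ∀ (fuel : Nat) (l acc : List Char), l.length ≤ fuel →
      PySem.Chars.replace.go old new fuel l acc = acc.reverse ++ pvRepF old new l := by
  intro fuel
  induction fuel with
  | zero =>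
    intro l acc hl
    have : l = [] := by cases l <;> simp_all
    subst this
    simp [PySem.Chars.replace.go, pvRepF]
  | succ n ih =>
    intro l acc hl
    match l with
    | [] => simp [PySem.Chars.replace.go, pvRepF]
    | c :: t =>
      rw [PySem.Chars.replace.go]
      by_cases hp : old.isPrefixOf (c :: t)
      · have hlen : 1 ≤ old.length := by cases old <;> simp_all
        rw [if_pos hp, ih _ _ (by
          simp only [List.length_drop, List.length_cons]
          simp only [List.length_cons] at hl
          omega)]
        rw [pvRepF, if_pos hp]
        have : max old.length 1 = old.length := by omega
        simp [this]
      · rw [if_neg hp, ih _ _ (by simp at hl ⊢; omega)]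
        rw [pvRepF, if_neg hp]
        simp

theorem pvReplace_eq_repF (old new : List Char) (h : old ≠ []) (s : List Char) :
    PySem.Chars.replace s old new = pvRepF old new s := by
  rw [PySem.Chars.replace]
  simp only [List.isEmpty_iff]
  rw [if_neg h]
  exact pvReplace_go_eq old new h s.length s [] (le_refl _)

theorem pvRepF_MM_len_le (l : List Char) : (pvRepF pvMM pvM l).length ≤ l.length := by
  fun_induction pvRepF pvMM pvM l with
  | case1 => simp
  | case2 c t hp ih =>
    have : pvMM <+: c :: t := List.isPrefixOf_iff_prefix.mp hp
    have h28 : 28 ≤ (c :: t).length := by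
      have := this.length_le; simpa [pvMM, pvM] using this
    simp only [List.length_append]
    have : ((c :: t).drop (max pvMM.length 1)).length = (c:: t).length - 28 := by
      simp [pvMM, pvM]
    simp [pvM, pvMM] at *
    omega
  | case3 c t hp ih => simp; omega

theorem pvRepF_MM_len_lt (l : List Char) (h : pvMM <:+: l) :
    (pvRepF pvMM pvM l).length < l.length := by
  fun_induction pvRepF pvMM pvM l with
  | case1 => simp [pvMM, pvM] at h
  | case2 c t hp ih =>
    have hpre : pvMM <+: c :: t := List.isPrefixOf_iff_prefix.mp hp
    have h28 : 28 ≤ (c :: t).length := by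
      have := hpre.length_le; simpa [pvMM, pvM] using this
    have hle := pvRepF_MM_len_le ((c :: t).drop (max pvMM.length 1))
    simp only [List.length_append]
    simp [pvMM, pvM] at *
    omega
  | case3 c t hp ih =>
    rcases List.infix_cons_iff.mp h with hpre | hinf
    · exact absurd (List.isPrefixOf_iff_prefix.mpr hpre) (by simpa using hp)
    · have := ih hinf; simp; omega

theorem pvReplace_MM_len_lt (t : List Char) (h : PySem.Chars.isIn pvMM t = true) :
    (PySem.Chars.replace t pvMM pvM).length < t.length := by
  rw [pvReplace_eq_repF pvMM pvM (by decide)]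
  exact pvRepF_MM_len_lt t ((PySem.Chars.isIn_iff_infix pvMM t).mp h)

-- A's while-loop: while 'PRESERVESPACESPRESERVESPACES' in text: text = text.replace(..., 'PRESERVESPACES')
def pvCollapse (t : List Char) : List Char :=
  if h : PySem.Chars.isIn pvMM t = true then pvCollapse (PySem.Chars.replace t pvMM pvM) else t
termination_by t.length
decreasing_by exact pvReplace_MM_len_lt t h

def insert_preserve_spaces_mark (text : String) : String :=
  if PySem.Str.startswith text "<" && PySem.Str.endswith text ">" then
    String.ofList ('<' :: PySem.Chars.join [' '] (PySem.Chars.split₀ (PySem.List.slice text.toList (some 1) (some (-1)))) ++ ['>'])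
  else if PySem.Chars.strip text.toList ≠ [] then
    String.ofList (pvCollapse (PySem.Chars.join [' '] (PySem.Chars.split₀
      (PySem.Chars.replace (PySem.Chars.replace text.toList [' '] pvM) ['\n'] pvM))))
  else text

-- ===== PORT B =====
def insert_preserve_spaces_mark_alt (text : String) : String :=
  if PySem.Str.startswith text "<" && PySem.Str.endswith text ">" then
    String.ofList ('<' :: PySem.Chars.join [' '] (PySem.Chars.split₀ (PySem.List.slice text.toList (some 1) (some (-1)))) ++ ['>'])
  else if PySem.Chars.strip text.toList ≠ [] then
    String.ofList (PySem.Chars.join [' '] (PySem.Chars.split₀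
      ((text.toList.foldl (fun (st : List Char × Bool) ch =>
          if ch = ' ' ∨ ch = '\n' then (if st.2 then st.1 else st.1 ++ pvM, true)
          else (st.1 ++ [ch], false)) ([], false)).1)))
  else text

-- ===== PRECONDITION & SPEC =====
-- Pre_ excludes texts that already contain the sentinel string 'PRESERVESPACES':
-- there A's collapse loop conflates pre-existing sentinel text with its inserted
-- markers (sentinel collision), an accidental corner no caller would specify.
def Pre_insert_preserve_spaces_mark (text : String) : Prop :=
  PySem.Str.isIn "PRESERVESPACES" text = false
instance (text : String) : Decidable (Pre_insert_preserve_spaces_mark text) := by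
  unfold Pre_insert_preserve_spaces_mark; infer_instance

def pvWitness_insert_preserve_spaces_mark : String := "a  b\t c\nd"

def Spec_insert_preserve_spaces_mark (text : String) (out : String) : Prop := out = insert_preserve_spaces_mark_alt text
instance (text : String) (out : String) : Decidable (Spec_insert_preserve_spaces_mark text out) := by unfold Spec_insert_preserve_spaces_mark; infer_instance

-- ===== CLAIM (what is proved, stated in full; the proofs are below) =====
def Claim_equal_insert_preserve_spaces_mark : Prop := ∀ (text : String), Dom_insert_preserve_spaces_mark text → Pre_insert_preserve_spaces_mark text → Spec_insert_preserve_spaces_mark text (insert_preserve_spaces_mark text)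


-- ===== LEMMAS AND PROOFS =====

-- boolean char classes: space/newline (marked by A and B) and tab/CR (left to split())
def pvSp (c : Char) : Bool := decide (c = ' ' ∨ c = '\n')
def pvTc (c : Char) : Bool := decide (c = '\t' ∨ c = '\r')

-- per-char expansion performed by A's two replace calls
def pvF (c : Char) : List Char := if pvSp c then pvM else [c]
def pvE (s : List Char) : List Char := s.flatMap pvF

-- recursive form of B's run-marking state machine
def pvMark2 : Bool → List Char → List Char
  | _, [] => []
  | run, c :: t => if pvSp c then (if run then pvMark2 true t else pvM ++ pvMark2 true t)
                   else c :: pvMark2 false t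

-- one pass of A's global replace: drop the second of each pair of adjacent sp-chars
def pvStep : List Char → List Char
  | [] => []
  | [c] => [c]
  | a :: b :: t => if pvSp a && pvSp b then a :: pvStep t else a :: pvStep (b :: t)

def pvHasPair : List Char → Bool
  | [] => false
  | [_] => false
  | a :: b :: t => (pvSp a && pvSp b) || pvHasPair (b :: t)

-- keep only the first sp-char of each maximal run
def pvSq : Bool → List Char → List Char
  | _, [] => []
  | run, c :: t => if pvSp c then (if run then pvSq true t else c :: pvSq true t)
                   else c :: pvSq false t

-- run state after a prefix
def pvEndRun (r : Bool) (s : List Char) : Bool := s.foldl (fun _ c => pvSp c) r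

-- split on tab/CR keeping empty pieces
def pvPieces : List Char → List (List Char)
  | [] => [[]]
  | c :: t => if pvTc c then [] :: pvPieces t
              else match pvPieces t with
                   | [] => [[c]]
                   | p :: ps => (c :: p) :: ps

-- ---- basic facts ----
theorem pvRepF_cons (old new : List Char) (c : Char) (t : List Char) :
    pvRepF old new (c :: t) =
      if old.isPrefixOf (c :: t) then new ++ pvRepF old new ((c :: t).drop (max old.length 1))
      else c :: pvRepF old new t := by
  rw [pvRepF]

theorem pvBorder (u : List Char) (hs : u <:+ pvM) (hp : u <+: pvM) : u = [] ∨ u = pvM := by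
  obtain ⟨t, ht⟩ := hs
  have hu : u = pvM.drop t.length := by rw [← ht]; simp
  have hlen : t.length + u.length = 14 := by
    have := congrArg List.length ht; simp [pvM] at this; omega
  have hb : ∀ i, i < 14 → 1 ≤ i → (pvM.drop i).isPrefixOf pvM = false := by decide
  rcases Nat.eq_zero_or_pos t.length with h0 | h1
  · right
    rw [hu, h0]; rfl
  · by_cases h14 : t.length = 14
    · left; rw [hu, h14]; rfl
    · exfalso
      have := hb t.length (by omega) h1
      rw [← hu] at this
      exact absurd (List.isPrefixOf_iff_prefix.mpr hp) (by simp [this])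

theorem pvE_append (x y : List Char) : pvE (x ++ y) = pvE x ++ pvE y := by
  simp [pvE]

theorem pvE_cons (c : Char) (t : List Char) : pvE (c :: t) = pvF c ++ pvE t := by
  simp [pvE]

theorem pvE_eq_nil (s : List Char) : pvE s = [] ↔ s = [] := by
  cases s with
  | nil => simp [pvE]
  | cons c t =>
    simp only [pvE, List.flatMap_cons, pvF]
    constructor
    · intro h
      split_ifs at h with hc
      · simp [pvM] at h
      · simp at h
    · intro h; simp at h

theorem pvE_nosp (s : List Char) (h : ∀ c ∈ s, pvSp c = false) : pvE s = s := by
  induction s with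
  | nil => rfl
  | cons c t ih =>
    have := h c (by simp)
    rw [pvE_cons, pvF, this, ih (fun d hd => h d (by simp [hd]))]
    simp

theorem pvE_mem (c : Char) (s : List Char) (h : c ∈ pvE s) :
    c ∈ pvM ∨ (c ∈ s ∧ pvSp c = false) := by
  induction s with
  | nil => simp [pvE] at h
  | cons d t ih =>
    rw [pvE_cons] at h
    rcases List.mem_append.mp h with h1 | h2
    · rw [pvF] at h1
      split_ifs at h1 with hd
      · exact Or.inl h1
      · simp at h1; subst h1
        exact Or.inr ⟨by simp, by simpa using hd⟩
    · rcases ih h2 with h3 | ⟨h3, h4⟩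
      · exact Or.inl h3
      · exact Or.inr ⟨by simp [h3], h4⟩

theorem pvMark2_mem (r : Bool) (c : Char) (s : List Char) (h : c ∈ pvMark2 r s) :
    c ∈ pvM ∨ (c ∈ s ∧ pvSp c = false) := by
  induction s generalizing r with
  | nil => simp [pvMark2] at h
  | cons d t ih =>
    simp only [pvMark2] at h
    split_ifs at h with hd hr
    · rcases ih _ h with h2 | ⟨h2, h3⟩
      · exact Or.inl h2
      · exact Or.inr ⟨by simp [h2], h3⟩
    · rcases List.mem_append.mp h with h1 | h1
      · exact Or.inl h1
      · rcases ih _ h1 with h2 | ⟨h2, h3⟩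
        · exact Or.inl h2
        · exact Or.inr ⟨by simp [h2], h3⟩
    · rcases List.mem_cons.mp h with h1 | h1
      · subst h1; exact Or.inr ⟨by simp, by simpa using hd⟩
      · rcases ih _ h1 with h2 | ⟨h2, h3⟩
        · exact Or.inl h2
        · exact Or.inr ⟨by simp [h2], h3⟩

theorem pvMark2_append (x y : List Char) : ∀ r,
    pvMark2 r (x ++ y) = pvMark2 r x ++ pvMark2 (pvEndRun r x) y := by
  induction x with
  | nil => intro r; simp [pvMark2, pvEndRun]
  | cons c t ih =>
    intro r
    have her2 : ∀ r', pvEndRun r' ((c :: t) ++ y) = pvEndRun (pvSp c) (t ++ y) := by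
      intro r'; simp [pvEndRun]
    have her3 : ∀ r', pvEndRun r' (c :: t) = pvEndRun (pvSp c) t := by
      intro r'; simp [pvEndRun]
    by_cases hc : pvSp c = true
    · cases r <;> simp [pvMark2, hc, her3, ih true]
    · have hc' : pvSp c = false := by simpa using hc
      simp [pvMark2, hc', her3, ih false]

theorem pvMark2_false_eq_nil (s : List Char) : pvMark2 false s = [] ↔ s = [] := by
  cases s with
  | nil => simp [pvMark2]
  | cons c t =>
    by_cases hc : pvSp c = true <;> simp [pvMark2, hc, pvM]

-- the replace-expansion of A equals pvE
theorem pvRepF_single (a : Char) (new l : List Char) :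
    pvRepF [a] new l = l.flatMap (fun c => if c = a then new else [c]) := by
  fun_induction pvRepF [a] new l with
  | case1 => simp
  | case2 c t hp ih =>
    simp only [List.isPrefixOf, Bool.and_eq_true, beq_iff_eq] at hp
    obtain ⟨hca, -⟩ := hp
    simp only [List.flatMap_cons, if_pos hca.symm]
    simpa using ih
  | case3 c t hp ih =>
    simp only [List.isPrefixOf, Bool.and_eq_true, beq_iff_eq] at hp
    have : ¬ c = a := fun h => hp ⟨h.symm, by simp [List.isPrefixOf]⟩
    simp only [List.flatMap_cons, if_neg this]
    simp [ih]

theorem pvE_eq (s : List Char) :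
    PySem.Chars.replace (PySem.Chars.replace s [' '] pvM) ['\n'] pvM = pvE s := by
  rw [pvReplace_eq_repF _ _ (by simp), pvReplace_eq_repF _ _ (by simp),
      pvRepF_single, pvRepF_single]
  induction s with
  | nil => rfl
  | cons c t ih =>
    rw [List.flatMap_cons, List.flatMap_append, ih, pvE_cons]
    congr 1
    by_cases h1 : c = ' '
    · subst h1
      have : pvM.flatMap (fun c => if c = '\n' then pvM else [c]) = pvM := by decide
      simp [this, pvF, pvSp]
    · by_cases h2 : c = '\n'
      · subst h2; simp [pvF, pvSp]
      · simp [h1, h2, pvF, pvSp]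
theorem pvMarkB_acc (s : List Char) : ∀ (acc : List Char) (r : Bool),
    (s.foldl (fun (st : List Char × Bool) ch =>
        if ch = ' ' ∨ ch = '\n' then (if st.2 then st.1 else st.1 ++ pvM, true)
        else (st.1 ++ [ch], false)) (acc, r)).1 = acc ++ pvMark2 r s := by
  induction s with
  | nil => intro acc r; simp [pvMark2]
  | cons c t ih =>
    intro acc r
    by_cases hc : c = ' ' ∨ c = '\n'
    · have hsp : pvSp c = true := by simp [pvSp]; tauto
      cases r <;> simp [hc, hsp, pvMark2, ih]
    · have hsp : pvSp c = false := by simp [pvSp]; tauto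
      simp [hc, hsp, pvMark2, ih]

theorem pvMarkB_eq (s : List Char) :
    (s.foldl (fun (st : List Char × Bool) ch =>
        if ch = ' ' ∨ ch = '\n' then (if st.2 then st.1 else st.1 ++ pvM, true)
        else (st.1 ++ [ch], false)) ([], false)).1 = pvMark2 false s := by
  simpa using pvMarkB_acc s [] false
theorem pv_noMprefix (w : List Char) (hw : ¬ pvM <:+: w) (hne : w ≠ [])
    (hh : pvSp (w.head hne) = false) : ¬ pvM <+: pvE w := by
  intro hM
  have hnosp : ∀ c ∈ w.takeWhile (fun c => !pvSp c), pvSp c = false := by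
    intro c hc; simpa using List.mem_takeWhile_imp hc
  have hEw : pvE w = w.takeWhile (fun c => !pvSp c) ++ pvE (w.dropWhile (fun c => !pvSp c)) := by
    conv_lhs => rw [← List.takeWhile_append_dropWhile (p := fun c => !pvSp c) (l := w)]
    rw [pvE_append, pvE_nosp _ hnosp]
  have hnne : w.takeWhile (fun c => !pvSp c) ≠ [] := by
    cases w with
    | nil => exact absurd rfl hne
    | cons a t =>
      simp only [List.head_cons] at hh
      simp [List.takeWhile_cons, hh]
  set n := w.takeWhile (fun c => !pvSp c) with hn
  set t' := w.dropWhile (fun c => !pvSp c) with ht'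
  rw [hEw] at hM
  by_cases hlen : 14 ≤ n.length
  · have hMn : pvM <+: n :=
      List.prefix_of_prefix_length_le hM (List.prefix_append n _) (by simp [pvM]; omega)
    exact hw (hMn.trans (List.takeWhile_prefix _)).isInfix
  · have hnM : n <+: pvM :=
      List.prefix_of_prefix_length_le (List.prefix_append n _) hM (by simp [pvM]; omega)
    obtain ⟨r, hr⟩ := hnM
    have hdropr : pvM.drop n.length = r := by rw [← hr, List.drop_left]
    have hMv : pvM = n ++ pvM.drop n.length := by rw [hdropr, hr]
    set v := pvM.drop n.length with hv
    have hvx : v <+: pvE t' := by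
      rw [hMv] at hM
      exact (List.prefix_append_right_inj n).mp (by simpa [List.append_assoc] using hM)
    have hvne : v ≠ [] := by
      intro h
      have := congrArg List.length hMv
      simp [h, pvM] at this
      omega
    cases ht'c : t' with
    | nil => rw [ht'c] at hvx; simp [pvE] at hvx; exact hvne hvx
    | cons d t'' =>
      have hd : pvSp d = true := by
        have h2 : List.dropWhile (fun c => !pvSp c) w = d :: t'' := by rw [← ht']; exact ht'c
        have h3 := List.head_dropWhile_not (fun c => !pvSp c) (l := w) (by rw [h2]; simp)
        simp only [h2, List.head_cons] at h3
        simpa using h3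
      have hEt' : pvE t' = pvM ++ pvE t'' := by
        rw [ht'c, pvE_cons, pvF, if_pos hd]
      rw [hEt'] at hvx
      have hvM : v <+: pvM := by
        refine List.prefix_of_prefix_length_le hvx (List.prefix_append _ _) ?_
        rw [hdropr]
        have := congrArg List.length hr
        simp [pvM] at this ⊢
        omega
      have hvS : v <:+ pvM := ⟨n, hMv.symm⟩
      rcases pvBorder v hvS hvM with h | h
      · exact hvne h
      · have h6 := congrArg List.length hMv
        rw [h] at h6
        simp only [List.length_append] at h6
        have h7 : n.length = 0 := by omega
        exact hnne (List.length_eq_zero_iff.mp h7)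
theorem pvRepF_skip (u x : List Char) (hu : u <:+ pvM) (hx : ¬ pvM <+: x) :
    pvRepF pvMM pvM (u ++ x) = u ++ pvRepF pvMM pvM x := by
  induction u with
  | nil => simp
  | cons c u' ih =>
    have hMp : pvM <+: pvMM := by rw [pvMM]; exact List.prefix_append _ _
    have hnp : ¬ pvMM.isPrefixOf ((c :: u') ++ x) = true := by
      rw [List.isPrefixOf_iff_prefix]
      intro hMM
      have hMpre : pvM <+: (c :: u') ++ x := hMp.trans hMM
      by_cases hlen : (c :: u').length < 14
      · have h1 : (c :: u') <+: pvM :=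
          List.prefix_of_prefix_length_le (List.prefix_append _ _) hMpre
            (by simp only [List.length_cons] at hlen ⊢; simp [pvM]; omega)
        rcases pvBorder (c :: u') hu h1 with h | h
        · simp at h
        · rw [h] at hlen; simp [pvM] at hlen
      · have hlen' : (c :: u').length = 14 := by
          have h5 := hu.length_le
          simp [pvM] at h5 hlen ⊢
          omega
        have heq : c :: u' = pvM := by
          have h14 : (c :: u').length = pvM.length := by simp [pvM]; simp [pvM] at hlen'; omega
          exact List.IsSuffix.eq_of_length hu h14
        rw [heq] at hMM
        have hMM2 : pvM ++ pvM <+: pvM ++ x := by simpa [pvMM] using hMM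
        exact hx ((List.prefix_append_right_inj pvM).mp hMM2)
    have hu' : u' <:+ pvM := (List.suffix_cons c u').trans hu
    show pvRepF pvMM pvM (c :: (u' ++ x)) = c :: (u' ++ pvRepF pvMM pvM x)
    rw [pvRepF_cons, if_neg (by simpa [List.cons_append] using hnp), ih hu']
theorem pvMM_infix_M_append (x : List Char) (h : pvMM <:+: pvM ++ x) (hx : ¬ pvM <+: x) :
    pvMM <:+: x := by
  obtain ⟨s, u, hsu⟩ := h
  rcases Nat.lt_or_ge s.length 14 with hlt | hge
  · rcases Nat.eq_zero_or_pos s.length with h0 | h1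
    · have hs : s = [] := List.length_eq_zero_iff.mp h0
      rw [hs, List.nil_append] at hsu
      have h2 : pvM ++ (pvM ++ u) = pvM ++ x := by
        rw [← hsu]; simp [pvMM, List.append_assoc]
      have hx' : x = pvM ++ u := (List.append_cancel_left h2).symm
      exact absurd (hx' ▸ List.prefix_append pvM u) hx
    · exfalso
      have h2 : pvMM ++ u = pvM.drop s.length ++ x := by
        have h3 := congrArg (List.drop s.length) hsu
        rw [List.append_assoc, List.drop_left] at h3
        rwa [List.drop_append_of_le_length (by simp [pvM]; omega)] at h3
      have hMpre : pvM <+: pvM.drop s.length ++ x := by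
        rw [← h2]
        simp only [pvMM, List.append_assoc]
        exact List.prefix_append _ _
      have hpre : pvM.drop s.length <+: pvM :=
        List.prefix_of_prefix_length_le (List.prefix_append _ _) hMpre (by simp [pvM])
      rcases pvBorder _ (List.drop_suffix _ _) hpre with h | h
      · have := congrArg List.length h; simp [pvM] at this; omega
      · have := congrArg List.length h; simp [pvM] at this; omega
  · have hspre : s <+: pvM ++ x := ⟨pvMM ++ u, by rw [← hsu]; simp [List.append_assoc]⟩
    have hMs : pvM <+: s :=
      List.prefix_of_prefix_length_le (List.prefix_append _ _) hspre (by simp [pvM]; omega)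
    obtain ⟨s', hs'⟩ := hMs
    refine ⟨s', u, ?_⟩
    have h2 : pvM ++ (s' ++ pvMM ++ u) = pvM ++ x := by
      rw [← hsu, ← hs']; simp [List.append_assoc]
    exact List.append_cancel_left h2
theorem pvRepF_MM_pre (x : List Char) :
    pvRepF pvMM pvM (pvMM ++ x) = pvM ++ pvRepF pvMM pvM x := by
  have hp : pvMM.isPrefixOf (pvMM ++ x) = true :=
    List.isPrefixOf_iff_prefix.mpr (List.prefix_append _ _)
  have e : pvMM ++ x = 'P'::'R'::'E'::'S'::'E'::'R'::'V'::'E'::'S'::'P'::'A'::'C'::'E'::'S'::'P'::'R'::'E'::'S'::'E'::'R'::'V'::'E'::'S'::'P'::'A'::'C'::'E'::'S'::x := by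
    simp [pvMM, pvM]
  rw [e, pvRepF_cons, if_pos (by rw [← e]; exact hp)]
  have hd : ('P'::'R'::'E'::'S'::'E'::'R'::'V'::'E'::'S'::'P'::'A'::'C'::'E'::'S'::'P'::'R'::'E'::'S'::'E'::'R'::'V'::'E'::'S'::'P'::'A'::'C'::'E'::'S'::x).drop (max pvMM.length 1) = x := by
    simp [pvMM, pvM]
  rw [hd]

theorem pvK1 (w : List Char) (hw : ¬ pvM <:+: w) :
    PySem.Chars.isIn pvMM (pvE w) = pvHasPair w := by
  have hMp : pvM <+: pvMM := ⟨pvM, rfl⟩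
  revert hw
  fun_induction pvStep w with
  | case1 =>
    intro hw
    have h1 : PySem.Chars.isIn pvMM ([] : List Char) = false := by decide
    simpa [pvE, pvHasPair] using h1
  | case2 c =>
    intro hw
    have hfalse : PySem.Chars.isIn pvMM (pvE [c]) = false := by
      rw [PySem.Chars.isIn_eq_false_iff]
      intro h
      have hl := h.length_le
      by_cases hc : pvSp c = true
      · simp [pvE, pvF, hc, pvM, pvMM] at hl
      · simp [pvE, pvF, hc, pvM, pvMM] at hl
    simp [hfalse, pvHasPair]
  | case3 a b t hcond ih =>
    intro hw
    obtain ⟨ha, hb⟩ : pvSp a = true ∧ pvSp b = true := by simpa using hcond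
    have hE : pvE (a :: b :: t) = pvMM ++ pvE t := by
      simp [pvE_cons, pvF, ha, hb, pvMM, List.append_assoc]
    have htrue : PySem.Chars.isIn pvMM (pvE (a :: b :: t)) = true := by
      rw [PySem.Chars.isIn_iff_infix, hE]
      exact (List.prefix_append _ _).isInfix
    simp [htrue, pvHasPair, ha, hb]
  | case4 a b t hcond ih =>
    intro hw
    have hw' : ¬ pvM <:+: (b :: t) := fun h => hw (List.infix_cons_iff.mpr (Or.inr h))
    have hc0 : (pvSp a && pvSp b) = false := by simpa using hcond
    have hPair : pvHasPair (a :: b :: t) = pvHasPair (b :: t) := by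
      simp [pvHasPair, hc0]
    by_cases ha : pvSp a = true
    · have hb : pvSp b = false := by
        rcases Bool.and_eq_false_iff.mp hc0 with h | h
        · rw [ha] at h; simp at h
        · exact h
      have hE : pvE (a :: b :: t) = pvM ++ pvE (b :: t) := by simp [pvE_cons, pvF, ha]
      have hnpre : ¬ pvM <+: pvE (b :: t) :=
        pv_noMprefix (b :: t) hw' (by simp) (by simpa using hb)
      have hiff : pvMM <:+: pvE (a :: b :: t) ↔ pvMM <:+: pvE (b :: t) := by
        rw [hE]
        constructor
        · intro h; exact pvMM_infix_M_append _ h hnpre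
        · intro h; exact h.trans (List.suffix_append _ _).isInfix
      have hb2 : PySem.Chars.isIn pvMM (pvE (a :: b :: t)) = PySem.Chars.isIn pvMM (pvE (b :: t)) :=
        Bool.eq_iff_iff.mpr (by rw [PySem.Chars.isIn_iff_infix, PySem.Chars.isIn_iff_infix]; exact hiff)
      rw [hb2, ih hw', hPair]
    · have ha' : pvSp a = false := by simpa using ha
      have hE : pvE (a :: b :: t) = a :: pvE (b :: t) := by simp [pvE_cons, pvF, ha']
      have hnM : ¬ pvM <+: pvE (a :: b :: t) := pv_noMprefix _ hw (by simp) (by simpa using ha')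
      have hiff : pvMM <:+: pvE (a :: b :: t) ↔ pvMM <:+: pvE (b :: t) := by
        rw [hE]
        constructor
        · intro h
          rcases List.infix_cons_iff.mp h with hp | hi
          · exact absurd (by rw [hE]; exact hMp.trans hp) hnM
          · exact hi
        · intro h; exact List.infix_cons_iff.mpr (Or.inr h)
      have hb2 : PySem.Chars.isIn pvMM (pvE (a :: b :: t)) = PySem.Chars.isIn pvMM (pvE (b :: t)) :=
        Bool.eq_iff_iff.mpr (by rw [PySem.Chars.isIn_iff_infix, PySem.Chars.isIn_iff_infix]; exact hiff)
      rw [hb2, ih hw', hPair]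
theorem pvK2 (w : List Char) (hw : ¬ pvM <:+: w) :
    pvRepF pvMM pvM (pvE w) = pvE (pvStep w) := by
  revert hw
  fun_induction pvStep w with
  | case1 => intro hw; simp [pvE, pvRepF]
  | case2 c =>
    intro hw
    by_cases hc : pvSp c = true
    · have hE : pvE [c] = pvM ++ [] := by simp [pvE, pvF, hc]
      rw [hE, pvRepF_skip pvM [] (List.suffix_refl _) (by simp [pvM])]
      simp [pvE, pvF, hc, pvRepF]
    · have hc' : pvSp c = false := by simpa using hc
      have hE : pvE [c] = [c] := by simp [pvE, pvF, hc']
      rw [hE, pvRepF_cons, if_neg (by simp [pvMM, pvM, List.isPrefixOf])]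
      simp [pvE, pvF, hc', pvRepF]
  | case3 a b t hcond ih =>
    intro hw
    obtain ⟨ha, hb⟩ : pvSp a = true ∧ pvSp b = true := by simpa using hcond
    have hw' : ¬ pvM <:+: t := fun h =>
      hw (List.infix_cons_iff.mpr (Or.inr (List.infix_cons_iff.mpr (Or.inr h))))
    have hE : pvE (a :: b :: t) = pvMM ++ pvE t := by
      simp [pvE_cons, pvF, ha, hb, pvMM, List.append_assoc]
    rw [hE, pvRepF_MM_pre, ih hw']
    simp [pvE_cons, pvF, ha]
  | case4 a b t hcond ih =>
    intro hw
    have hw' : ¬ pvM <:+: (b :: t) := fun h => hw (List.infix_cons_iff.mpr (Or.inr h))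
    by_cases ha : pvSp a = true
    · have hb : pvSp b = false := by
        rcases Bool.and_eq_false_iff.mp (by simpa using hcond) with h | h
        · rw [ha] at h; simp at h
        · exact h
      have hE : pvE (a :: b :: t) = pvM ++ pvE (b :: t) := by simp [pvE_cons, pvF, ha]
      rw [hE, pvRepF_skip pvM _ (List.suffix_refl _)
            (pv_noMprefix (b :: t) hw' (by simp) (by simpa using hb)), ih hw']
      simp [pvE_cons, pvF, ha]
    · have ha' : pvSp a = false := by simpa using ha
      have hE : pvE (a :: b :: t) = a :: pvE (b :: t) := by simp [pvE_cons, pvF, ha']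
      have hnM : ¬ pvM <+: pvE (a :: b :: t) := pv_noMprefix _ hw (by simp) (by simpa using ha')
      have hc : ¬ pvMM.isPrefixOf (a :: pvE (b :: t)) = true := by
        intro hMM
        have hMp : pvM <+: pvMM := ⟨pvM, rfl⟩
        exact hnM (by rw [hE]; exact hMp.trans (List.isPrefixOf_iff_prefix.mp hMM))
      rw [hE, pvRepF_cons, if_neg hc, ih hw']
      simp [pvE_cons, pvF, ha']
theorem pvStep_len_le (w : List Char) : (pvStep w).length ≤ w.length := by
  fun_induction pvStep w with
  | case1 => simp
  | case2 c => simp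
  | case3 a b t hcond ih => simp; omega
  | case4 a b t hcond ih => simp at ih ⊢; omega

theorem pvStep_len_lt (w : List Char) (h : pvHasPair w = true) :
    (pvStep w).length < w.length := by
  revert h
  fun_induction pvStep w with
  | case1 => intro h; simp [pvHasPair] at h
  | case2 c => intro h; simp [pvHasPair] at h
  | case3 a b t hcond ih =>
    intro h
    have := pvStep_len_le t
    simp
    omega
  | case4 a b t hcond ih =>
    intro h
    have hc0 : (pvSp a && pvSp b) = false := by simpa using hcond
    have h2 : pvHasPair (b :: t) = true := by
      have := h
      simp [pvHasPair, hc0] at this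
      exact this
    have := ih h2
    simp at this ⊢
    omega
theorem pvStep_prefix (w u : List Char) (hu : ∀ c ∈ u, pvSp c = false)
    (h : u <+: pvStep w) : u <+: w := by
  revert u h
  fun_induction pvStep w with
  | case1 => intro u hu h; exact h
  | case2 c => intro u hu h; exact h
  | case3 a b t hcond ih =>
    intro u hu h
    obtain ⟨ha, hb⟩ : pvSp a = true ∧ pvSp b = true := by simpa using hcond
    cases u with
    | nil => exact List.nil_prefix
    | cons d u' =>
      obtain ⟨r, hr⟩ := h
      injection hr with h1 h2
      subst h1
      have := hu d (by simp)
      rw [ha] at this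
      simp at this
  | case4 a b t hcond ih =>
    intro u hu h
    cases u with
    | nil => exact List.nil_prefix
    | cons d u' =>
      obtain ⟨r, hr⟩ := h
      injection hr with h1 h2
      subst h1
      have h3 : u' <+: pvStep (b :: t) := ⟨r, h2⟩
      have h4 : u' <+: b :: t := ih u' (fun c hc => hu c (by simp [hc])) h3
      obtain ⟨q, hq⟩ := h4
      exact ⟨q, by rw [List.cons_append, hq]⟩
theorem pvStep_infix (w : List Char) (h : pvM <:+: pvStep w) : pvM <:+: w := by
  have hPtail : ∀ c ∈ pvM.tail, pvSp c = false := by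
    intro c hc
    simp [pvM] at hc
    rcases hc with rfl|rfl|rfl|rfl|rfl|rfl|rfl|rfl|rfl|rfl|rfl|rfl|rfl <;> rfl
  revert h
  fun_induction pvStep w with
  | case1 => intro h; exact h
  | case2 c => intro h; exact h
  | case3 a b t hcond ih =>
    intro h
    obtain ⟨ha, hb⟩ : pvSp a = true ∧ pvSp b = true := by simpa using hcond
    rcases List.infix_cons_iff.mp h with hp | hi
    · exfalso
      obtain ⟨r, hr⟩ := hp
      rw [show pvM = 'P' :: pvM.tail from rfl, List.cons_append] at hr
      injection hr with h1 h2
      rw [← h1] at ha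
      simp [pvSp] at ha
    · exact List.infix_cons_iff.mpr (Or.inr (List.infix_cons_iff.mpr (Or.inr (ih hi))))
  | case4 a b t hcond ih =>
    intro h
    rcases List.infix_cons_iff.mp h with hp | hi
    · obtain ⟨r, hr⟩ := hp
      rw [show pvM = 'P' :: pvM.tail from rfl, List.cons_append] at hr
      injection hr with h1 h2
      by_cases ha : pvSp a = true
      · exfalso; rw [← h1] at ha; simp [pvSp] at ha
      · have hv : pvM.tail <+: pvStep (b :: t) := ⟨r, h2⟩
        have hvw : pvM.tail <+: b :: t := pvStep_prefix (b :: t) pvM.tail hPtail hv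
        obtain ⟨q, hq⟩ := hvw
        have : pvM <+: a :: b :: t := by
          rw [show pvM = 'P' :: pvM.tail from rfl, h1]
          exact ⟨q, by rw [List.cons_append, hq]⟩
        exact this.isInfix
    · exact List.infix_cons_iff.mpr (Or.inr (ih hi))
theorem pvSq_cons_sp_false (c : Char) (t : List Char) (hc : pvSp c = true) :
    pvSq false (c :: t) = c :: pvSq true t := by simp [pvSq, hc]

theorem pvSq_cons_nonsp (r : Bool) (c : Char) (t : List Char) (hc : pvSp c = false) :
    pvSq r (c :: t) = c :: pvSq false t := by cases r <;> simp [pvSq, hc]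

theorem pvSq_step (w : List Char) : ∀ r, pvSq r (pvStep w) = pvSq r w := by
  fun_induction pvStep w with
  | case1 => intro r; rfl
  | case2 c => intro r; rfl
  | case3 a b t hcond ih =>
    intro r
    obtain ⟨ha, hb⟩ : pvSp a = true ∧ pvSp b = true := by simpa using hcond
    cases r <;> simp [pvSq, ha, hb, ih true]
  | case4 a b t hcond ih =>
    intro r
    by_cases ha : pvSp a = true <;> cases r <;> simp [pvSq, ha, ih true, ih false]
theorem pvSq_nopair (w : List Char) (h : pvHasPair w = false) :
    pvSq false w = w ∧ ((∀ hne : w ≠ [], pvSp (w.head hne) = false) → pvSq true w = w) := by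
  induction w with
  | nil => exact ⟨rfl, fun _ => rfl⟩
  | cons c t ih =>
    cases t with
    | nil =>
      constructor
      · by_cases hc : pvSp c = true
        · rw [pvSq_cons_sp_false c [] hc]; rfl
        · rw [pvSq_cons_nonsp false c [] (by simpa using hc)]; rfl
      · intro hh
        have hc : pvSp c = false := by simpa using hh (by simp)
        rw [pvSq_cons_nonsp true c [] hc]; rfl
    | cons b t' =>
      have h1 : (pvSp c && pvSp b) = false ∧ pvHasPair (b :: t') = false := by
        simpa [pvHasPair] using h
      have ih' := ih h1.2
      constructor
      · by_cases hc : pvSp c = true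
        · have hb : pvSp b = false := by
            rcases Bool.and_eq_false_iff.mp h1.1 with h2 | h2
            · rw [hc] at h2; simp at h2
            · exact h2
          have h3 := ih'.2 (fun _ => by simpa using hb)
          rw [pvSq_cons_sp_false c _ hc, h3]
        · rw [pvSq_cons_nonsp false c _ (by simpa using hc), ih'.1]
      · intro hh
        have hc : pvSp c = false := by simpa using hh (by simp)
        rw [pvSq_cons_nonsp true c _ hc, ih'.1]
theorem pvE_sq_eq_mark2 (w : List Char) : ∀ r, pvE (pvSq r w) = pvMark2 r w := by
  induction w with
  | nil => intro r; rfl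
  | cons c t ih =>
    intro r
    by_cases hc : pvSp c = true
    · cases r <;> simp [pvSq, pvMark2, hc, pvE_cons, pvF, ih]
    · have hc' : pvSp c = false := by simpa using hc
      simp [pvSq, pvMark2, hc', pvE_cons, pvF, ih]
theorem pvCollapse_E_aux : ∀ (n : Nat) (w : List Char), w.length ≤ n → ¬ pvM <:+: w →
    pvCollapse (pvE w) = pvMark2 false w := by
  intro n
  induction n with
  | zero =>
    intro w hl hw
    have hwnil : w = [] := by cases w <;> simp_all
    subst hwnil
    have h1 : PySem.Chars.isIn pvMM ([] : List Char) = false := by decide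
    rw [show pvE [] = [] from rfl, pvCollapse, dif_neg (by simp [h1])]
    rfl
  | succ n ih =>
    intro w hl hw
    rw [pvCollapse]
    by_cases hin : PySem.Chars.isIn pvMM (pvE w) = true
    · have hp : pvHasPair w = true := by rw [← pvK1 w hw]; exact hin
      rw [dif_pos hin, pvReplace_eq_repF _ _ (by simp [pvMM, pvM]), pvK2 w hw]
      have hstep : (pvStep w).length ≤ n := by
        have := pvStep_len_lt w hp; omega
      rw [ih (pvStep w) hstep (fun h => hw (pvStep_infix w h))]
      rw [← pvE_sq_eq_mark2, ← pvE_sq_eq_mark2, pvSq_step]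
    · rw [dif_neg hin]
      have hin' : PySem.Chars.isIn pvMM (pvE w) = false := by simpa using hin
      have hp : pvHasPair w = false := by rw [← pvK1 w hw]; exact hin'
      conv_lhs => rw [← (pvSq_nopair w hp).1]
      exact pvE_sq_eq_mark2 w false

theorem pvCollapse_E (w : List Char) (hw : ¬ pvM <:+: w) :
    pvCollapse (pvE w) = pvMark2 false w := by
  exact pvCollapse_E_aux w.length w le_rfl hw
theorem pv_go_acc (x cur : List Char) (acc : List (List Char)) :
    PySem.Chars.split₀.go x cur acc = acc.reverse ++ PySem.Chars.split₀.go x cur [] := by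
  induction x generalizing cur acc with
  | nil =>
    rw [PySem.Chars.split₀.go, PySem.Chars.split₀.go]
    by_cases hc : cur.isEmpty = true <;> simp [hc]
  | cons c rest ih =>
    rw [PySem.Chars.split₀.go]
    conv_rhs => rw [PySem.Chars.split₀.go]
    by_cases hs : PySem.Chars.isspace c = true
    · rw [if_pos hs, if_pos hs]
      by_cases hc : cur.isEmpty = true
      · rw [if_pos hc, if_pos hc]
        exact ih [] acc
      · rw [if_neg hc, if_neg hc]
        rw [ih [] (cur.reverse :: acc), ih [] [cur.reverse]]
        simp
    · rw [if_neg hs, if_neg hs]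
      exact ih (c :: cur) acc
theorem pvSplit_sep (c : Char) (hc : PySem.Chars.isspace c = true) (x y : List Char) :
    PySem.Chars.split₀ (x ++ c :: y) = PySem.Chars.split₀ x ++ PySem.Chars.split₀ y := by
  suffices h : ∀ (x cur : List Char),
      PySem.Chars.split₀.go (x ++ c :: y) cur [] =
        PySem.Chars.split₀.go x cur [] ++ PySem.Chars.split₀ y by
    rw [PySem.Chars.split₀, PySem.Chars.split₀]
    exact h x []
  intro x
  induction x with
  | nil =>
    intro cur
    conv_lhs => rw [List.nil_append, PySem.Chars.split₀.go]
    rw [if_pos hc]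
    by_cases hcur : cur.isEmpty = true
    · rw [if_pos hcur]
      rw [show PySem.Chars.split₀.go [] cur [] = [] from by
            rw [PySem.Chars.split₀.go, if_pos hcur]; rfl]
      rw [PySem.Chars.split₀]
      rfl
    · rw [if_neg hcur]
      rw [show PySem.Chars.split₀.go [] cur [] = [cur.reverse] from by
            rw [PySem.Chars.split₀.go, if_neg hcur]; rfl]
      rw [pv_go_acc y [] [cur.reverse], PySem.Chars.split₀]
      rfl
  | cons d x' ih =>
    intro cur
    conv_lhs => rw [List.cons_append, PySem.Chars.split₀.go]
    conv_rhs => rw [PySem.Chars.split₀.go]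
    by_cases hs : PySem.Chars.isspace d = true
    · rw [if_pos hs, if_pos hs]
      by_cases hcur : cur.isEmpty = true
      · rw [if_pos hcur, if_pos hcur]
        exact ih []
      · rw [if_neg hcur, if_neg hcur]
        rw [pv_go_acc (x' ++ c :: y) [] [cur.reverse], pv_go_acc x' [] [cur.reverse], ih []]
        simp
    · rw [if_neg hs, if_neg hs]
      exact ih (d :: cur)
theorem pvSplit_wsfree (x : List Char) (h : ∀ c ∈ x, PySem.Chars.isspace c = false) :
    PySem.Chars.split₀ x = if x = [] then [] else [x] := by
  suffices h2 : ∀ (x cur : List Char), (∀ c ∈ x, PySem.Chars.isspace c = false) →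
      PySem.Chars.split₀.go x cur [] =
        (if cur.reverse ++ x = [] then [] else [cur.reverse ++ x]) by
    rw [PySem.Chars.split₀, h2 x [] h]
    simp
  intro x
  induction x with
  | nil =>
    intro cur hcur
    rw [PySem.Chars.split₀.go]
    by_cases hc : cur.isEmpty = true
    · rw [if_pos hc]
      have : cur = [] := by simpa [List.isEmpty_iff] using hc
      simp [this]
    · rw [if_neg hc]
      have : cur ≠ [] := by simpa [List.isEmpty_iff] using hc
      simp [this]
  | cons d x' ih =>
    intro cur hcur
    rw [PySem.Chars.split₀.go, if_neg (by simp [hcur d (by simp)])]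
    rw [ih (d :: cur) (fun e he => hcur e (by simp [he]))]
    simp
theorem pvAscii_isspace (c : Char) (hd : pvDomChar c = true) (h1 : pvSp c = false)
    (h2 : pvTc c = false) : PySem.Chars.isspace c = false := by
  have hne : ∀ (d : Char), c.toNat = d.toNat → c = d := by
    intro d h
    exact Char.ext (UInt32.toNat_inj.mp h)
  have h32 : c.toNat ≠ 32 := fun h => by
    have : c = ' ' := hne ' ' (by simpa using h)
    simp [this, pvSp] at h1
  have h10 : c.toNat ≠ 10 := fun h => by
    have : c = '\n' := hne '\n' (by simpa using h)
    simp [this, pvSp] at h1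
  have h9 : c.toNat ≠ 9 := fun h => by
    have : c = '\t' := hne '\t' (by simpa using h)
    simp [this, pvTc] at h2
  have h13 : c.toNat ≠ 13 := fun h => by
    have : c = '\r' := hne '\r' (by simpa using h)
    simp [this, pvTc] at h2
  simp only [pvDomChar, Bool.or_eq_true, Bool.and_eq_true, decide_eq_true_eq,
    beq_iff_eq] at hd
  simp only [PySem.Chars.isspace, Bool.or_eq_true, Bool.and_eq_true,
    decide_eq_true_eq, Bool.or_eq_false_iff, Bool.and_eq_false_iff,
    decide_eq_false_iff_not]
  omega
theorem pvTc_isspace (c : Char) (h : pvTc c = true) : PySem.Chars.isspace c = true := by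
  simp only [pvTc, decide_eq_true_eq] at h
  rcases h with rfl | rfl <;> decide
theorem pvM_wsfree (c : Char) (h : c ∈ pvM) : PySem.Chars.isspace c = false := by
  have : pvM.all (fun c => PySem.Chars.isspace c = false) := by decide
  simpa using List.all_eq_true.mp this c h
theorem pvPieces_ne_nil (s : List Char) : pvPieces s ≠ [] := by
  cases s with
  | nil => simp [pvPieces]
  | cons c t =>
    rw [pvPieces]
    split_ifs with hc
    · simp
    · cases h : pvPieces t <;> simp
theorem pvPieces_tcfree (s : List Char) (h : ∀ c ∈ s, pvTc c = false) : pvPieces s = [s] := by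
  induction s with
  | nil => rfl
  | cons c t ih =>
    rw [pvPieces, if_neg (by simp [h c (by simp)])]
    rw [ih (fun d hd => h d (by simp [hd]))]
theorem pvPieces_append (a : List Char) (c : Char) (b : List Char)
    (ha : ∀ d ∈ a, pvTc d = false) (hc : pvTc c = true) :
    pvPieces (a ++ c :: b) = a :: pvPieces b := by
  induction a with
  | nil =>
    rw [List.nil_append, pvPieces, if_pos hc]
  | cons d a' ih =>
    rw [List.cons_append, pvPieces, if_neg (by simp [ha d (by simp)])]
    rw [ih (fun e he => ha e (by simp [he]))]
theorem pvPieces_spec (s : List Char) :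
    (∀ p ∈ pvPieces s, p <:+: s) ∧ (∀ q qs, pvPieces s = q :: qs → q <+: s) := by
  induction s with
  | nil =>
    constructor
    · intro p hp; simp [pvPieces] at hp; simp [hp]
    · intro q qs h; simp [pvPieces] at h; simp [h.1]
  | cons c t ih =>
    by_cases hc : pvTc c = true
    · constructor
      · intro p hp
        rw [pvPieces, if_pos hc] at hp
        rcases List.mem_cons.mp hp with h1 | h1
        · simp [h1]
        · exact (ih.1 p h1).trans (List.infix_cons_iff.mpr (Or.inr (List.infix_refl t)))
      · intro q qs h
        rw [pvPieces, if_pos hc] at h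
        injection h with h1 h2
        rw [← h1]
        exact List.nil_prefix
    · cases hpt : pvPieces t with
      | nil => exact absurd hpt (pvPieces_ne_nil t)
      | cons q qs =>
        have hsplit : pvPieces (c :: t) = (c :: q) :: qs := by
          rw [pvPieces, if_neg hc, hpt]
        have hqpre : q <+: t := ih.2 q qs hpt
        constructor
        · intro p hp
          rw [hsplit] at hp
          rcases List.mem_cons.mp hp with h1 | h1
          · subst h1
            obtain ⟨z, hz⟩ := hqpre
            have hcq : c :: q <+: c :: t := ⟨z, by rw [List.cons_append, hz]⟩
            exact hcq.isInfix
          · exact (ih.1 p (by simp [hpt, h1])).trans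
              (List.infix_cons_iff.mpr (Or.inr (List.infix_refl t)))
        · intro r rs h
          rw [hsplit] at h
          injection h with h1 h2
          rw [← h1]
          obtain ⟨z, hz⟩ := hqpre
          exact ⟨z, by rw [List.cons_append, hz]⟩

theorem pvPieces_infix (s p : List Char) (h : p ∈ pvPieces s) : p <:+: s := by
  exact (pvPieces_spec s).1 p h
theorem pvTc_sp (c : Char) (h : pvTc c = true) : pvSp c = false := by
  simp only [pvTc, decide_eq_true_eq] at h
  rcases h with rfl | rfl <;> rfl

theorem pvP1_aux : ∀ (n : Nat) (s : List Char), s.length ≤ n → (∀ c ∈ s, pvDomChar c = true) →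
    PySem.Chars.split₀ (pvE s) = ((pvPieces s).filter (· ≠ [])).map pvE := by
  intro n
  induction n with
  | zero =>
    intro s hl _
    have hs : s = [] := by cases s <;> simp_all
    subst hs
    rfl
  | succ n ih =>
    intro s hl hd
    cases hrest : s.dropWhile (fun c => !pvTc c) with
    | nil =>
      have htc : ∀ c ∈ s, pvTc c = false := by
        intro c hc
        have := List.dropWhile_eq_nil_iff.mp hrest c hc
        simpa using this
      have hws : ∀ c ∈ pvE s, PySem.Chars.isspace c = false := by
        intro c hc
        rcases pvE_mem c s hc with h1 | ⟨h1, h2⟩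
        · exact pvM_wsfree c h1
        · exact pvAscii_isspace c (hd c h1) h2 (htc c h1)
      rw [pvSplit_wsfree _ hws, pvPieces_tcfree s htc]
      by_cases hs0 : s = []
      · simp [hs0, pvE]
      · have hne : pvE s ≠ [] := fun h => hs0 ((pvE_eq_nil s).mp h)
        simp [hne, hs0]
    | cons d b =>
      have hsplit : s.takeWhile (fun c => !pvTc c) ++ d :: b = s := by
        rw [← hrest]; exact List.takeWhile_append_dropWhile
      set a := s.takeWhile (fun c => !pvTc c) with ha
      have hdTc : pvTc d = true := by
        have h3 := List.head_dropWhile_not (fun c => !pvTc c) (l := s) (by rw [hrest]; simp)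
        simp only [hrest, List.head_cons] at h3
        simpa using h3
      have haTc : ∀ c ∈ a, pvTc c = false := fun c hc => by
        simpa using List.mem_takeWhile_imp hc
      have hdSp : pvSp d = false := pvTc_sp d hdTc
      have hmem : ∀ c ∈ b, c ∈ s := fun c hc => by rw [← hsplit]; simp [hc]
      have hmema : ∀ c ∈ a, c ∈ s := fun c hc => by rw [← hsplit]; simp [hc]
      have hlen : b.length ≤ n := by
        have := congrArg List.length hsplit
        simp at this
        omega
      have hE : pvE s = pvE a ++ d :: pvE b := by
        conv_lhs => rw [← hsplit]
        rw [pvE_append, pvE_cons, pvF, if_neg (by simp [hdSp])]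
        simp
      have hws : ∀ c ∈ pvE a, PySem.Chars.isspace c = false := by
        intro c hc
        rcases pvE_mem c a hc with h1 | ⟨h1, h2⟩
        · exact pvM_wsfree c h1
        · exact pvAscii_isspace c (hd c (hmema c h1)) h2 (haTc c h1)
      rw [hE, pvSplit_sep d (pvTc_isspace d hdTc) _ _, pvSplit_wsfree _ hws]
      rw [ih b hlen (fun c hc => hd c (hmem c hc))]
      conv_rhs => rw [← hsplit]
      rw [pvPieces_append a d b haTc hdTc]
      by_cases ha0 : a = []
      · simp [ha0, pvE]
      · have hne : pvE a ≠ [] := fun h => ha0 ((pvE_eq_nil a).mp h)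
        simp [ha0, hne]

theorem pvP1 (s : List Char) (hd : ∀ c ∈ s, pvDomChar c = true) :
    PySem.Chars.split₀ (pvE s) = ((pvPieces s).filter (· ≠ [])).map pvE := by
  exact pvP1_aux s.length s le_rfl hd
theorem pvP2_aux : ∀ (n : Nat) (s : List Char), s.length ≤ n → (∀ c ∈ s, pvDomChar c = true) →
    PySem.Chars.split₀ (pvMark2 false s) = ((pvPieces s).filter (· ≠ [])).map (pvMark2 false) := by
  intro n
  induction n with
  | zero =>
    intro s hl _
    have hs : s = [] := by cases s <;> simp_all
    subst hs
    rfl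
  | succ n ih =>
    intro s hl hd
    cases hrest : s.dropWhile (fun c => !pvTc c) with
    | nil =>
      have htc : ∀ c ∈ s, pvTc c = false := by
        intro c hc
        have := List.dropWhile_eq_nil_iff.mp hrest c hc
        simpa using this
      have hws : ∀ c ∈ pvMark2 false s, PySem.Chars.isspace c = false := by
        intro c hc
        rcases pvMark2_mem false c s hc with h1 | ⟨h1, h2⟩
        · exact pvM_wsfree c h1
        · exact pvAscii_isspace c (hd c h1) h2 (htc c h1)
      rw [pvSplit_wsfree _ hws, pvPieces_tcfree s htc]
      by_cases hs0 : s = []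
      · simp [hs0, pvMark2]
      · have hne : pvMark2 false s ≠ [] := fun h => hs0 ((pvMark2_false_eq_nil s).mp h)
        simp [hne, hs0]
    | cons d b =>
      have hsplit : s.takeWhile (fun c => !pvTc c) ++ d :: b = s := by
        rw [← hrest]; exact List.takeWhile_append_dropWhile
      set a := s.takeWhile (fun c => !pvTc c) with ha
      have hdTc : pvTc d = true := by
        have h3 := List.head_dropWhile_not (fun c => !pvTc c) (l := s) (by rw [hrest]; simp)
        simp only [hrest, List.head_cons] at h3
        simpa using h3
      have haTc : ∀ c ∈ a, pvTc c = false := fun c hc => by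
        simpa using List.mem_takeWhile_imp hc
      have hdSp : pvSp d = false := pvTc_sp d hdTc
      have hmem : ∀ c ∈ b, c ∈ s := fun c hc => by rw [← hsplit]; simp [hc]
      have hmema : ∀ c ∈ a, c ∈ s := fun c hc => by rw [← hsplit]; simp [hc]
      have hlen : b.length ≤ n := by
        have := congrArg List.length hsplit
        simp at this
        omega
      have hE : pvMark2 false s = pvMark2 false a ++ d :: pvMark2 false b := by
        conv_lhs => rw [← hsplit]
        rw [pvMark2_append a (d :: b) false]
        congr 1
        simp [pvMark2, hdSp]
      have hws : ∀ c ∈ pvMark2 false a, PySem.Chars.isspace c = false := by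
        intro c hc
        rcases pvMark2_mem false c a hc with h1 | ⟨h1, h2⟩
        · exact pvM_wsfree c h1
        · exact pvAscii_isspace c (hd c (hmema c h1)) h2 (haTc c h1)
      rw [hE, pvSplit_sep d (pvTc_isspace d hdTc) _ _, pvSplit_wsfree _ hws]
      rw [ih b hlen (fun c hc => hd c (hmem c hc))]
      conv_rhs => rw [← hsplit]
      rw [pvPieces_append a d b haTc hdTc]
      by_cases ha0 : a = []
      · simp [ha0, pvMark2]
      · have hne : pvMark2 false a ≠ [] := fun h => ha0 ((pvMark2_false_eq_nil a).mp h)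
        simp [ha0, hne]

theorem pvP2 (s : List Char) (hd : ∀ c ∈ s, pvDomChar c = true) :
    PySem.Chars.split₀ (pvMark2 false s) = ((pvPieces s).filter (· ≠ [])).map (pvMark2 false) := by
  exact pvP2_aux s.length s le_rfl hd
theorem pvPrefix_sep (u a : List Char) (x : Char) (b : List Char)
    (h : u <+: a ++ x :: b) (hx : x ∉ u) : u <+: a := by
  induction a generalizing u with
  | nil =>
    cases u with
    | nil => exact List.nil_prefix
    | cons y u' =>
      obtain ⟨r, hr⟩ := h
      rw [List.nil_append, List.cons_append] at hr
      injection hr with h1 h2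
      exact absurd (by simp [← h1]) hx
  | cons d a' ih =>
    cases u with
    | nil => exact List.nil_prefix
    | cons y u' =>
      obtain ⟨r, hr⟩ := h
      rw [List.cons_append, List.cons_append] at hr
      injection hr with h1 h2
      subst h1
      have h4 := ih u' ⟨r, h2⟩ (fun hm => hx (by simp [hm]))
      obtain ⟨q, hq⟩ := h4
      exact ⟨q, by rw [List.cons_append, hq]⟩
theorem pvInfix_sep (u a : List Char) (x : Char) (b : List Char)
    (h : u <:+: a ++ x :: b) (hx : x ∉ u) : u <:+: a ∨ u <:+: b := by
  induction a with
  | nil =>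
    rcases List.infix_cons_iff.mp h with hp | hi
    · cases u with
      | nil => exact Or.inl List.nil_infix
      | cons y u' =>
        obtain ⟨r, hr⟩ := hp
        rw [List.cons_append] at hr
        injection hr with h1 h2
        exact absurd (by simp [← h1]) hx
    · exact Or.inr hi
  | cons d a' ih =>
    rcases List.infix_cons_iff.mp h with hp | hi
    · exact Or.inl (List.IsPrefix.isInfix (pvPrefix_sep u (d :: a') x b hp hx))
    · rcases ih hi with h1 | h1
      · exact Or.inl (List.infix_cons_iff.mpr (Or.inr h1))
      · exact Or.inr h1
theorem pvIsIn_sep (a b : List Char) :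
    PySem.Chars.isIn pvMM (a ++ ' ' :: b) = (PySem.Chars.isIn pvMM a || PySem.Chars.isIn pvMM b) := by
  have h1 : ' ' ∉ pvMM := by simp [pvMM, pvM]
  apply Bool.eq_iff_iff.mpr
  rw [PySem.Chars.isIn_iff_infix, Bool.or_eq_true, PySem.Chars.isIn_iff_infix,
      PySem.Chars.isIn_iff_infix]
  constructor
  · intro h
    exact pvInfix_sep pvMM a ' ' b h h1
  · intro h
    rcases h with h | h
    · exact h.trans (List.prefix_append a (' ' :: b)).isInfix
    · exact h.trans (List.IsSuffix.isInfix ⟨a ++ [' '], by simp⟩)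
theorem pvRepF_sep_nil (b : List Char) :
    pvRepF pvMM pvM ([] ++ ' ' :: b) = pvRepF pvMM pvM [] ++ ' ' :: pvRepF pvMM pvM b := by
  rw [List.nil_append, pvRepF_cons, if_neg (by simp [pvMM, pvM, List.isPrefixOf])]
  simp [pvRepF]

theorem pvRepF_sep_aux : ∀ (n : Nat) (a b : List Char), a.length ≤ n →
    pvRepF pvMM pvM (a ++ ' ' :: b) = pvRepF pvMM pvM a ++ ' ' :: pvRepF pvMM pvM b := by
  intro n
  induction n with
  | zero =>
    intro a b hl
    have ha : a = [] := by cases a <;> simp_all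
    subst ha
    exact pvRepF_sep_nil b
  | succ n ih =>
    intro a b hl
    cases a with
    | nil => exact pvRepF_sep_nil b
    | cons c a' =>
      by_cases hpre : pvMM <+: (c :: a')
      · have hpre2 : pvMM <+: (c :: a') ++ ' ' :: b := hpre.trans (List.prefix_append _ _)
        have hlen28 : 28 ≤ (c :: a').length := by
          have := hpre.length_le; simpa [pvMM, pvM] using this
        have hpre2' : pvMM <+: c :: (a' ++ ' ' :: b) := by simpa using hpre2
        conv_lhs => rw [List.cons_append, pvRepF_cons]
        rw [if_pos (List.isPrefixOf_iff_prefix.mpr hpre2')]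
        conv_rhs => rw [pvRepF_cons]
        rw [if_pos (List.isPrefixOf_iff_prefix.mpr hpre)]
        have hmax : max pvMM.length 1 = 28 := by simp [pvMM, pvM]
        have hdrop : (c :: (a' ++ ' ' :: b)).drop (max pvMM.length 1) =
            (c :: a').drop (max pvMM.length 1) ++ ' ' :: b := by
          rw [hmax]
          have h9 := List.drop_append_of_le_length (l₁ := c :: a') (l₂ := ' ' :: b) (i := 28) hlen28
          simpa using h9
        rw [hdrop, ih _ b (by simp only [List.length_drop, List.length_cons] at *; omega)]
        simp [List.append_assoc]
      · have hnc : ¬ pvMM <+: (c :: a') ++ ' ' :: b := by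
          intro hMM
          by_cases hlen28 : 28 ≤ (c :: a').length
          · exact hpre (List.prefix_of_prefix_length_le hMM (List.prefix_append _ _)
              (by simpa [pvMM, pvM] using hlen28))
          · have hca : (c :: a') <+: pvMM :=
              List.prefix_of_prefix_length_le (List.prefix_append _ _) hMM
                (by simp only [List.length_cons] at hlen28 ⊢; simp [pvMM, pvM]; omega)
            obtain ⟨w, hw⟩ := hca
            have hwpre : w <+: ' ' :: b := by
              rw [← hw] at hMM
              exact (List.prefix_append_right_inj (c :: a')).mp hMM
            cases w with
            | nil =>
              have := congrArg List.length hw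
              simp only [List.length_append, List.length_nil, List.length_cons] at this hlen28
              simp [pvMM, pvM] at this
              omega
            | cons e w' =>
              obtain ⟨r2, hr2⟩ := hwpre
              rw [List.cons_append] at hr2
              injection hr2 with h1 h2
              have hsp : ' ' ∈ pvMM := by rw [← hw]; simp [h1]
              exact (by simp [pvMM, pvM] : ' ' ∉ pvMM) hsp
        have hnc' : ¬ pvMM.isPrefixOf (c :: (a' ++ ' ' :: b)) = true := by
          intro hh
          exact hnc (by simpa using List.isPrefixOf_iff_prefix.mp hh)
        conv_lhs => rw [List.cons_append, pvRepF_cons]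
        rw [if_neg hnc']
        conv_rhs => rw [pvRepF_cons]
        rw [if_neg (fun hh => hpre (List.isPrefixOf_iff_prefix.mp hh))]
        rw [ih a' b (by simp only [List.length_cons] at hl; omega)]
        simp

theorem pvRepF_sep (a b : List Char) :
    pvRepF pvMM pvM (a ++ ' ' :: b) = pvRepF pvMM pvM a ++ ' ' :: pvRepF pvMM pvM b := by
  exact pvRepF_sep_aux a.length a b le_rfl
theorem pvRepF_id (l : List Char) (h : ¬ pvMM <:+: l) : pvRepF pvMM pvM l = l := by
  fun_induction pvRepF pvMM pvM l with
  | case1 => rfl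
  | case2 c t hp ih =>
    exact absurd (List.isPrefixOf_iff_prefix.mp hp).isInfix h
  | case3 c t hp ih =>
    have : ¬ pvMM <:+: t := fun h2 => h (List.infix_cons_iff.mpr (Or.inr h2))
    rw [ih this]
theorem pvIsIn_join (ts : List (List Char)) :
    PySem.Chars.isIn pvMM (PySem.Chars.join [' '] ts) = ts.any (PySem.Chars.isIn pvMM) := by
  induction ts with
  | nil =>
    rw [PySem.Chars.join_nil]
    simp
    decide
  | cons t ts ih =>
    cases ts with
    | nil => simp [PySem.Chars.join_singleton]
    | cons t2 ts' =>
      rw [PySem.Chars.join_cons_cons,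
          show t ++ [' '] ++ PySem.Chars.join [' '] (t2 :: ts') =
            t ++ ' ' :: PySem.Chars.join [' '] (t2 :: ts') from by simp,
          pvIsIn_sep, ih]
      simp
theorem pvRepF_join (ts : List (List Char)) :
    pvRepF pvMM pvM (PySem.Chars.join [' '] ts) = PySem.Chars.join [' '] (ts.map (pvRepF pvMM pvM)) := by
  induction ts with
  | nil =>
    rw [PySem.Chars.join_nil]
    simp [pvRepF, PySem.Chars.join_nil]
  | cons t ts ih =>
    cases ts with
    | nil => simp [PySem.Chars.join_singleton]
    | cons t2 ts' =>
      rw [PySem.Chars.join_cons_cons,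
          show t ++ [' '] ++ PySem.Chars.join [' '] (t2 :: ts') =
            t ++ ' ' :: PySem.Chars.join [' '] (t2 :: ts') from by simp,
          pvRepF_sep, ih,
          show List.map (pvRepF pvMM pvM) (t :: t2 :: ts') =
            pvRepF pvMM pvM t :: pvRepF pvMM pvM t2 :: List.map (pvRepF pvMM pvM) ts' from rfl,
          PySem.Chars.join_cons_cons]
      simp
theorem pvSumLe (ts : List (List Char)) :
    ((ts.map (pvRepF pvMM pvM)).map List.length).sum ≤ (ts.map List.length).sum := by
  induction ts with
  | nil => simp
  | cons t ts ih =>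
    simp only [List.map_cons, List.sum_cons]
    have := pvRepF_MM_len_le t
    omega

theorem pvSumLt (ts : List (List Char)) (h : ts.any (PySem.Chars.isIn pvMM) = true) :
    ((ts.map (pvRepF pvMM pvM)).map List.length).sum < (ts.map List.length).sum := by
  induction ts with
  | nil => simp at h
  | cons t ts ih =>
    simp only [List.any_cons, Bool.or_eq_true] at h
    simp only [List.map_cons, List.sum_cons]
    rcases h with h | h
    · have h1 := pvRepF_MM_len_lt t ((PySem.Chars.isIn_iff_infix _ _).mp h)
      have h2 := pvSumLe ts
      omega
    · have h1 := ih h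
      have h2 := pvRepF_MM_len_le t
      omega

theorem pvCollapse_join_aux : ∀ (n : Nat) (ts : List (List Char)), (ts.map List.length).sum ≤ n →
    pvCollapse (PySem.Chars.join [' '] ts) = PySem.Chars.join [' '] (ts.map pvCollapse) := by
  intro n
  induction n using Nat.strong_induction_on with
  | _ n ih =>
    intro ts hsum
    rw [pvCollapse]
    by_cases hin : PySem.Chars.isIn pvMM (PySem.Chars.join [' '] ts) = true
    · have hany : ts.any (PySem.Chars.isIn pvMM) = true := by
        rw [← pvIsIn_join ts]; exact hin
      have hlt := pvSumLt ts hany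
      rw [dif_pos hin, pvReplace_eq_repF _ _ (by simp [pvMM, pvM]), pvRepF_join]
      have hn0 : 0 < n := by omega
      rw [ih ((ts.map (pvRepF pvMM pvM)).map List.length).sum (by omega) _ le_rfl]
      congr 1
      rw [List.map_map]
      apply List.map_congr_left
      intro t ht
      by_cases h : PySem.Chars.isIn pvMM t = true
      · conv_rhs => rw [pvCollapse]
        rw [dif_pos h, pvReplace_eq_repF _ _ (by simp [pvMM, pvM])]
        rfl
      · rw [Function.comp_apply, pvRepF_id t]
        rw [← PySem.Chars.isIn_eq_false_iff]
        simpa using h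
    · rw [dif_neg hin]
      have hany : ts.any (PySem.Chars.isIn pvMM) = false := by
        rw [← pvIsIn_join ts]; simpa using hin
      have hmap : ts.map pvCollapse = ts := by
        conv_rhs => rw [← List.map_id ts]
        apply List.map_congr_left
        intro t ht
        have hf : PySem.Chars.isIn pvMM t = false := by
          have := List.any_eq_false.mp hany t ht
          simpa using this
        rw [pvCollapse, dif_neg (by simp [hf])]
        rfl
      rw [hmap]

theorem pvCollapse_join (ts : List (List Char)) :
    pvCollapse (PySem.Chars.join [' '] ts) = PySem.Chars.join [' '] (ts.map pvCollapse) := by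
  exact pvCollapse_join_aux (ts.map List.length).sum ts le_rfl
theorem pvMain2 (s : List Char) (hd : ∀ c ∈ s, pvDomChar c = true) (hs : ¬ pvM <:+: s) :
    pvCollapse (PySem.Chars.join [' '] (PySem.Chars.split₀
        (PySem.Chars.replace (PySem.Chars.replace s [' '] pvM) ['\n'] pvM)))
      = PySem.Chars.join [' '] (PySem.Chars.split₀ (pvMark2 false s)) := by
  rw [pvE_eq s, pvP1 s hd, pvCollapse_join, pvP2 s hd, List.map_map]
  congr 1
  apply List.map_congr_left
  intro p hp
  have hpi : p <:+: s := pvPieces_infix s p (List.mem_of_mem_filter hp)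
  exact pvCollapse_E p (fun h => hs (h.trans hpi))
-- ===== VERDICT (by name: the statement is the Claim_ definition above) =====
theorem insert_preserve_spaces_mark_spec : Claim_equal_insert_preserve_spaces_mark := by
  unfold Claim_equal_insert_preserve_spaces_mark
  intro text hDom hPre
  unfold Spec_insert_preserve_spaces_mark
  unfold insert_preserve_spaces_mark insert_preserve_spaces_mark_alt
  by_cases h1 : (PySem.Str.startswith text "<" && PySem.Str.endswith text ">") = true
  · rw [if_pos h1, if_pos h1]
  · rw [if_neg h1, if_neg h1]
    by_cases h2 : PySem.Chars.strip text.toList ≠ []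
    · rw [if_pos h2, if_pos h2]
      congr 1
      have hd : ∀ c ∈ text.toList, pvDomChar c = true := by
        intro c hc
        have hDom' : pvDomStr text = true := hDom
        exact List.all_eq_true.mp (by simpa [pvDomStr] using hDom') c hc
      have hfree : ¬ pvM <:+: text.toList := by
        intro hin
        have h3 := (PySem.Str.isIn_iff_infix "PRESERVESPACES" text).mpr
          (by rw [show ("PRESERVESPACES".toList : List Char) = pvM from by decide]; exact hin)
        rw [Pre_insert_preserve_spaces_mark] at hPre
        rw [hPre] at h3
        simp at h3
      rw [pvMarkB_eq]
      exact pvMain2 text.toList hd hfree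
    · rw [if_neg h2, if_neg h2]
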